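-- pv_equiv track=rewrite | github.com/eliottcassidy2000/math | 04-computation/sigma_structure.py | verify_tournament_sigma_preserves_H
-- ===== SOURCE A (Python) =====
-- def count_ham_dp(adj, n):
--     dp = {}
--     for v in range(n):
--         dp[(1 << v, v)] = 1
--     full = (1 << n) - 1
--     for mask in range(1, 1 << n):
--         for v in range(n):
--             if not (mask & (1 << v)):
--                 continue
--             key = (mask, v)
--             if key not in dp or dp[key] == 0:
--                 continue
--             for u in range(n):
--                 if mask & (1 << u):
--                     continue
--                 if adj[v][u]:
--                     nkey = (mask | (1 << u), u)
--                     dp[nkey] = dp.get(nkey, 0) + dp[key]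
--     return sum(dp.get((full, v), 0) for v in range(n))
--
-- def build_adj(n, arc_bits, arcs):
--     adj = [[False]*n for _ in range(n)]
--     for i in range(n-1):
--         adj[i][i+1] = True
--     for k, (i,j) in enumerate(arcs):
--         if arc_bits & (1 << k):
--             adj[j][i] = True
--         else:
--             adj[i][j] = True
--     return adj
--
-- def tourn_sigma_arc(i, j, n):
--     """Tournament sigma (converse) on 0-indexed arc (i,j)."""
--     si, sj = n-1-j, n-1-i
--     if si > sj:
--         si, sj = sj, si
--     return (si, sj)
--
-- def verify_tournament_sigma_preserves_H(n):
--     """Verify that tournament sigma (converse) always preserves H."""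
--     arcs = [(i,j) for i in range(n) for j in range(i+2, n)]
--     m = len(arcs)
--     if m > 18:
--         return None
--
--     # Build tournament sigma permutation
--     tourn_perm = {}
--     for k, (i,j) in enumerate(arcs):
--         s = tourn_sigma_arc(i, j, n)
--         if s in arcs:
--             tourn_perm[k] = arcs.index(s)
--         else:
--             tourn_perm[k] = k
--
--     # Compute H for all tilings
--     h_vals = {}
--     for bits in range(1 << m):
--         adj = build_adj(n, bits, arcs)
--         h_vals[bits] = count_ham_dp(adj, n)
--
--     # Apply tournament sigma
--     for bits in range(1 << m):
--         new_bits = 0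
--         for k in range(m):
--             if bits & (1 << k):
--                 new_bits |= (1 << tourn_perm[k])
--         assert h_vals[bits] == h_vals[new_bits], \
--             f"Tournament sigma changes H at n={n}: H({bits})={h_vals[bits]} != H({new_bits})={h_vals[new_bits]}"
--
--     return True
-- ===== SOURCE B (Python) =====
-- def count_ham_rec(adj, n):
--     """Top-down memoized DP: f(mask, v) = number of Hamiltonian paths of the
--     sub-digraph on the vertices of mask that end at v."""
--     memo = {}
--
--     def f(mask, v):
--         if mask & (1 << v) == 0:
--             return 0
--         if mask == (1 << v):
--             return 1
--         key = (mask, v)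
--         if key in memo:
--             return memo[key]
--         rest = mask ^ (1 << v)
--         total = 0
--         for u in range(n):
--             if rest & (1 << u) and adj[u][v]:
--                 total += f(rest, u)
--         memo[key] = total
--         return total
--
--     full = (1 << n) - 1
--     return sum(f(full, v) for v in range(n))
--
--
-- def build_adj(n, arc_bits, arcs):
--     adj = [[False] * n for _ in range(n)]
--     for i in range(n - 1):
--         adj[i][i + 1] = True
--     for k, (i, j) in enumerate(arcs):
--         if arc_bits & (1 << k):
--             adj[j][i] = True
--         else:
--             adj[i][j] = True
--     return adj
--
--
-- def tourn_sigma_arc(i, j, n):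
--     """Tournament sigma (converse) on 0-indexed arc (i,j)."""
--     si, sj = n - 1 - j, n - 1 - i
--     if si > sj:
--         si, sj = sj, si
--     return (si, sj)
--
--
-- def verify_tournament_sigma_preserves_H(n):
--     """Verify that tournament sigma (converse) always preserves H."""
--     # closed form for the number of arcs: |{(i,j) : 0 <= i, i+2 <= j < n}|
--     m = (n - 1) * (n - 2) // 2 if n >= 2 else 0
--     if m > 18:
--         return None
--
--     arcs = [(i, j) for i in range(n) for j in range(i + 2, n)]
--
--     # index of each arc, built once (no repeated linear scans)
--     idx = {arc: k for k, arc in enumerate(arcs)}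
--     perm = [idx.get(tourn_sigma_arc(i, j, n), k) for k, (i, j) in enumerate(arcs)]
--
--     # H for every orientation of the arcs, as a list indexed by the bit mask
--     h = [count_ham_rec(build_adj(n, bits, arcs), n) for bits in range(1 << m)]
--
--     for bits in range(1 << m):
--         image = 0
--         for k in range(m):
--             if (bits >> k) & 1:
--                 image |= 1 << perm[k]
--         assert h[bits] == h[image], \
--             f"Tournament sigma changes H at n={n}: H({bits})={h[bits]} != H({image})={h[image]}"
--
--     return True
-- ===== Notes on version B (the rewrite author's own statement) =====
-- stated objective: faster
-- what changed: count_ham_dp's iterative forward (push) dict DP is replaced by a top-down memoized recursion on predecessor states; the arc count m is computed by the closed form (n-1)(n-2)//2 before building anything, so the m>18 early exit no longer materialises the Theta(n^2) arc list; the repeated arcs.index scans are replaced by an arc->index dict built once, and the per-orientation H values are kept in a list instead of a dict.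
import Mathlib
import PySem

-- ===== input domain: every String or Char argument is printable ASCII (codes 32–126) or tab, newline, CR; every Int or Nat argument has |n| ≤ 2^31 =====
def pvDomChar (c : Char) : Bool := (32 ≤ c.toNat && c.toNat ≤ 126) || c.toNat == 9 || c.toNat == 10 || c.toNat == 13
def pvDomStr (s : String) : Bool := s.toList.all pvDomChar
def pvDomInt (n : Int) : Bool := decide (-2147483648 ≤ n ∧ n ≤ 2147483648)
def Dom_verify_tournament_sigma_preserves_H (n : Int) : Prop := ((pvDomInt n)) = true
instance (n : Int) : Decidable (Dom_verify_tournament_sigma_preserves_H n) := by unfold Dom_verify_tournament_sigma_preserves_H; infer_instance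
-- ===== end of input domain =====

-- B replaces A's forward (push) bitmask DP over an explicit dict by a top-down memoized
-- recursion on predecessors, computes the arc count m by the closed form (n-1)(n-2)//2
-- instead of materialising the Θ(n²) arc list before the m > 18 test, and replaces the
-- repeated arcs.index scans by an index dict built once (objective: faster).

-- ===== PORT A =====
-- shared helpers (identical code in both Python files): every int in them is nonnegative
-- and every index is in range at every call site, so Nat / getD are exact there.

-- adj[u][v]
def adjAt (adj : List (List Bool)) (u v : Nat) : Bool := (adj.getD u []).getD v false

-- adj[r][c] = True
def adjSet (adj : List (List Bool)) (r c : Nat) : List (List Bool) :=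
  adj.set r ((adj.getD r []).set c true)

def build_adj (n arc_bits : Nat) (arcs : List (Nat × Nat)) : List (List Bool) :=
  let adj := List.replicate n (List.replicate n false)
  let adj := (List.range (n - 1)).foldl (fun a i => adjSet a i (i + 1)) adj
  arcs.zipIdx.foldl (fun a p =>
    if arc_bits &&& (1 <<< p.2) ≠ 0 then adjSet a p.1.2 p.1.1
    else adjSet a p.1.1 p.1.2) adj

-- tournament sigma on a 0-indexed arc (i, j); j ≤ n-1 at every call, so Nat subtraction is exact
def tourn_sigma_arc (i j n : Nat) : Nat × Nat :=
  let si := n - 1 - j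
  let sj := n - 1 - i
  if si > sj then (sj, si) else (si, sj)

-- A's count_ham_dp: iterative forward DP over a dict keyed by (mask, v)
def count_ham_dp (adj : List (List Bool)) (n : Nat) : Int :=
  let dp0 : PySem.Dict (Nat × Nat) Int :=
    (List.range n).foldl (fun d v => d.insert (1 <<< v, v) 1) PySem.Dict.empty
  let full := (1 <<< n) - 1
  let dp := (List.range' 1 (1 <<< n - 1)).foldl (fun d mask =>
    (List.range n).foldl (fun d v =>
      if mask &&& (1 <<< v) = 0 then d
      else if d.contains (mask, v) = false ∨ d.getD (mask, v) 0 = 0 then d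
      else (List.range n).foldl (fun d u =>
        if mask &&& (1 <<< u) ≠ 0 then d
        else if adjAt adj v u then
          d.insert (mask ||| (1 <<< u), u)
            (d.getD (mask ||| (1 <<< u), u) 0 + d.getD (mask, v) 0)
        else d) d) d) dp0
  ((List.range n).map (fun v => dp.getD (full, v) 0)).sum

-- A's verify: Python raises ValueError for n < 0 (excluded by Pre_); on n ≥ 0 all ints
-- below are nonnegative, represented as Nat (exact there).  A failing assert raises,
-- modelled as none; every dict lookup in the loop hits an existing key.
def verify_tournament_sigma_preserves_H (n : Int) : Option Bool :=
  let N := n.toNat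
  let arcs := (List.range N).flatMap (fun i =>
    (List.range' (i + 2) (N - (i + 2))).map (fun j => (i, j)))
  let m := arcs.length
  if m > 18 then none
  else
    let tourn_perm : PySem.Dict Nat Nat :=
      arcs.zipIdx.foldl (fun d p =>
        let s := tourn_sigma_arc p.1.1 p.1.2 N
        if arcs.contains s then d.insert p.2 ((PySem.List.index? arcs s).getD 0)
        else d.insert p.2 p.2) PySem.Dict.empty
    let h_vals : PySem.Dict Nat Int :=
      (List.range (1 <<< m)).foldl
        (fun d bits => d.insert bits (count_ham_dp (build_adj N bits arcs) N)) PySem.Dict.empty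
    if (List.range (1 <<< m)).all (fun bits =>
        let new_bits := (List.range m).foldl (fun nb k =>
          if bits &&& (1 <<< k) ≠ 0 then nb ||| (1 <<< (tourn_perm.getD k 0)) else nb) 0
        h_vals.getD bits 0 == h_vals.getD new_bits 0)
    then some true else none

-- ===== PORT B =====
-- B's f(mask, v): memoized top-down recursion (the memo dict is a caching device only;
-- the ported value is the recursion itself)
def altF (adj : List (List Bool)) (n : Nat) (mask v : Nat) : Int :=
  if h : mask &&& (1 <<< v) = 0 then 0
  else if mask = 1 <<< v then 1
  else
    ((List.range n).map (fun u =>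
      if (mask ^^^ (1 <<< v)) &&& (1 <<< u) ≠ 0 ∧ adjAt adj u v then
        altF adj n (mask ^^^ (1 <<< v)) u
      else 0)).sum
termination_by mask
decreasing_by
  have hb : mask.testBit v = true := by
    rcases Bool.eq_false_or_eq_true (mask.testBit v) with ht | hf
    · exact ht
    · exact absurd (by simp [Nat.one_shiftLeft, Nat.and_two_pow, hf]) h
  apply Nat.lt_of_testBit v
  · simp [Nat.one_shiftLeft, Nat.testBit_xor, hb]
  · exact hb
  · intro j hj
    simp [Nat.one_shiftLeft, Nat.testBit_xor, Nat.testBit_two_pow_of_ne (Nat.ne_of_lt hj)]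

def count_ham_rec (adj : List (List Bool)) (n : Nat) : Int :=
  let full := (1 <<< n) - 1
  ((List.range n).map (fun v => altF adj n full v)).sum

-- B's verify (same Nat representation; Python raises ValueError for n < 0, excluded by Pre_)
def verify_tournament_sigma_preserves_H_alt (n : Int) : Option Bool :=
  let m : Int := if n ≥ 2 then PySem.Int.floordiv ((n - 1) * (n - 2)) 2 else 0
  if m > 18 then none
  else
    let N := n.toNat
    let M := m.toNat
    let arcs := (List.range N).flatMap (fun i =>
      (List.range' (i + 2) (N - (i + 2))).map (fun j => (i, j)))
    let idx : PySem.Dict (Nat × Nat) Nat :=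
      arcs.zipIdx.foldl (fun d p => d.insert p.1 p.2) PySem.Dict.empty
    let perm : List Nat :=
      arcs.zipIdx.map (fun p => idx.getD (tourn_sigma_arc p.1.1 p.1.2 N) p.2)
    let h : List Int :=
      (List.range (1 <<< M)).map (fun bits => count_ham_rec (build_adj N bits arcs) N)
    if (List.range (1 <<< M)).all (fun bits =>
        let image := (List.range M).foldl (fun img k =>
          if (bits >>> k) &&& 1 ≠ 0 then img ||| (1 <<< (perm.getD k 0)) else img) 0
        h.getD bits 0 == h.getD image 0)
    then some true else none

-- ===== PRECONDITION & SPEC =====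
-- Pre_ excludes exactly n < 0, where Python A raises ValueError ('negative shift count')
def Pre_verify_tournament_sigma_preserves_H (n : Int) : Prop := 0 ≤ n
instance (n : Int) : Decidable (Pre_verify_tournament_sigma_preserves_H n) := by
  unfold Pre_verify_tournament_sigma_preserves_H; infer_instance

def pvWitness_verify_tournament_sigma_preserves_H : Int := 3

def Spec_verify_tournament_sigma_preserves_H (n : Int) (out : Option Bool) : Prop :=
  out = verify_tournament_sigma_preserves_H_alt n
instance (n : Int) (out : Option Bool) : Decidable (Spec_verify_tournament_sigma_preserves_H n out) := by
  unfold Spec_verify_tournament_sigma_preserves_H; infer_instance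

-- ===== CLAIM (what is proved, stated in full; the proofs are below) =====
def Claim_equal_verify_tournament_sigma_preserves_H : Prop :=
  ∀ (n : Int), Dom_verify_tournament_sigma_preserves_H n →
    Pre_verify_tournament_sigma_preserves_H n →
    Spec_verify_tournament_sigma_preserves_H n (verify_tournament_sigma_preserves_H n)

-- ===== LEMMAS AND PROOFS =====

-- ---- bit-twiddling facts ----
theorem band_one_shl_eq_zero_iff (m v : Nat) : m &&& (1 <<< v) = 0 ↔ m.testBit v = false := by
  rw [Nat.one_shiftLeft, Nat.and_two_pow]
  cases h : m.testBit v <;> simp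

theorem shr_band_one_eq_zero_iff (m v : Nat) : (m >>> v) &&& 1 = 0 ↔ m.testBit v = false := by
  rw [Nat.and_one_is_mod, Nat.shiftRight_eq_div_pow, Nat.testBit_eq_decide_div_mod_eq]
  simp only [decide_eq_false_iff_not]
  omega

theorem xor_one_shl_lt {m v : Nat} (h : m.testBit v = true) : m ^^^ (1 <<< v) < m := by
  apply Nat.lt_of_testBit v
  · simp [Nat.one_shiftLeft, Nat.testBit_xor, h]
  · exact h
  · intro j hj
    simp [Nat.one_shiftLeft, Nat.testBit_xor, Nat.testBit_two_pow_of_ne (Nat.ne_of_lt hj)]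

theorem testBit_or_one_shl_self (m u : Nat) : (m ||| (1 <<< u)).testBit u = true := by
  simp [Nat.one_shiftLeft, Nat.testBit_or]

theorem or_one_shl_xor {m u : Nat} (h : m.testBit u = false) : (m ||| (1 <<< u)) ^^^ (1 <<< u) = m := by
  apply Nat.eq_of_testBit_eq
  intro j
  by_cases hj : j = u
  · subst hj; simp [Nat.one_shiftLeft, Nat.testBit_xor, Nat.testBit_or, h]
  · simp [Nat.one_shiftLeft, Nat.testBit_xor, Nat.testBit_or,
      Nat.testBit_two_pow_of_ne (fun he => hj he.symm)]

theorem eq_or_of_xor_one_shl {mask v K : Nat} (hb : mask.testBit v = true)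
    (hx : mask ^^^ (1 <<< v) = K) : mask = K ||| (1 <<< v) ∧ K.testBit v = false := by
  subst hx
  constructor
  · apply Nat.eq_of_testBit_eq
    intro j
    by_cases hj : j = v
    · subst hj; simp [Nat.one_shiftLeft, Nat.testBit_or, Nat.testBit_xor, hb]
    · simp [Nat.one_shiftLeft, Nat.testBit_or, Nat.testBit_xor,
        Nat.testBit_two_pow_of_ne (fun he => hj he.symm)]
  · simp [Nat.one_shiftLeft, Nat.testBit_xor, hb]

-- ---- generic facts about a fold of dict inserts with input-determined keys/values ----
theorem getD_foldl_insert_miss {α κ ν : Type} [BEq κ] [LawfulBEq κ]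
    (xs : List α) (k : α → κ) (val : α → ν) (d : PySem.Dict κ ν) (key : κ) (dflt : ν)
    (h : ∀ a ∈ xs, k a ≠ key) :
    (xs.foldl (fun d a => d.insert (k a) (val a)) d).getD key dflt = d.getD key dflt := by
  induction xs generalizing d with
  | nil => rfl
  | cons a tl ih =>
    simp only [List.foldl_cons]
    rw [ih _ (fun b hb => h b (List.mem_cons_of_mem _ hb)),
      PySem.Dict.getD_insert_of_ne _ _ _ (fun he => h a (List.mem_cons_self) he.symm)]

theorem getD_foldl_insert_hit {α κ ν : Type} [BEq κ] [LawfulBEq κ]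
    (xs : List α) (k : α → κ) (val : α → ν) (dflt : ν) :
    ∀ (d : PySem.Dict κ ν) (x : α), x ∈ xs → (∀ y ∈ xs, k y = k x → val y = val x) →
    (xs.foldl (fun d a => d.insert (k a) (val a)) d).getD (k x) dflt = val x := by
  induction xs with
  | nil => intro d x hx _; cases hx
  | cons a tl ih =>
    intro d x hx hagree
    simp only [List.foldl_cons]
    by_cases hex : ∃ y ∈ tl, k y = k x
    · obtain ⟨y, hy, hky⟩ := hex
      rw [← hky]
      rw [ih _ y hy (fun z hz hkz => by
        rw [hagree z (List.mem_cons_of_mem _ hz) (hkz.trans hky),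
          hagree y (List.mem_cons_of_mem _ hy) hky])]
      exact hagree y (List.mem_cons_of_mem _ hy) hky
    · have hxa : x = a := by
        rcases List.mem_cons.mp hx with h | h
        · exact h
        · exact absurd ⟨x, h, rfl⟩ hex
      subst hxa
      rw [getD_foldl_insert_miss _ k val _ _ _ (fun y hy he => hex ⟨y, hy, he⟩),
        PySem.Dict.getD_insert_self]

-- ---- the initial dict of A's DP ----
theorem dp0_getD (N mask w : Nat) :
    (((List.range N).foldl (fun d v => d.insert (1 <<< v, v) 1)
        PySem.Dict.empty : PySem.Dict (Nat × Nat) Int)).getD (mask, w) 0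
      = if mask = 1 <<< w ∧ w < N then 1 else 0 := by
  by_cases h : mask = 1 <<< w ∧ w < N
  · obtain ⟨h1, h2⟩ := h
    subst h1
    rw [if_pos ⟨rfl, h2⟩]
    exact getD_foldl_insert_hit (List.range N) (fun v => (1 <<< v, v)) (fun _ => 1) 0 _ w
      (List.mem_range.mpr h2) (fun y _ _ => rfl)
  · rw [if_neg h, getD_foldl_insert_miss _ (fun v => ((1 <<< v : Nat), v)) (fun _ => (1 : Int)) _ _ _ ?_]
    · rfl
    · intro v hv he
      rw [Prod.mk.injEq] at he
      exact h ⟨he.2 ▸ he.1.symm, he.2 ▸ List.mem_range.mp hv⟩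

-- ---- the innermost u-loop of A's DP ----
theorem innerU (adj : List (List Bool)) (m v : Nat) (us : List Nat) :
    us.Nodup → ∀ (d : PySem.Dict (Nat × Nat) Int) (mask' u' : Nat),
    ((us.foldl (fun d u =>
        if m &&& (1 <<< u) ≠ 0 then d
        else if adjAt adj v u then
          d.insert (m ||| (1 <<< u), u)
            (d.getD (m ||| (1 <<< u), u) 0 + d.getD (m, v) 0)
        else d) d)).getD (mask', u') 0 =
      d.getD (mask', u') 0 +
        (if u' ∈ us ∧ m.testBit u' = false ∧ adjAt adj v u' = true ∧ mask' = m ||| (1 <<< u')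
         then d.getD (m, v) 0 else 0) := by
  induction us with
  | nil => intro _ d mask' u'; simp
  | cons u tl ih =>
    intro hnd d mask' u'
    obtain ⟨hu, htl⟩ := List.nodup_cons.mp hnd
    simp only [List.foldl_cons]
    by_cases hbit : m &&& (1 <<< u) ≠ 0
    · have tb : m.testBit u = true := by
        rcases Bool.eq_false_or_eq_true (m.testBit u) with h | h
        · exact h
        · exact absurd ((band_one_shl_eq_zero_iff m u).mpr h) hbit
      rw [if_pos hbit, ih htl d mask' u']
      congr 1
      apply if_congr _ rfl rfl
      constructor
      · rintro ⟨h1, h2, h3, h4⟩; exact ⟨List.mem_cons_of_mem _ h1, h2, h3, h4⟩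
      · rintro ⟨h1, h2, h3, h4⟩
        rcases List.mem_cons.mp h1 with he | he
        · subst he; rw [tb] at h2; cases h2
        · exact ⟨he, h2, h3, h4⟩
    · rw [not_ne_iff] at hbit
      have tb : m.testBit u = false := (band_one_shl_eq_zero_iff m u).mp hbit
      rw [if_neg (fun hc => hc hbit)]
      by_cases hadj : adjAt adj v u = true
      · rw [if_pos hadj, ih htl _ mask' u']
        have hne : ((m : Nat), v) ≠ (m ||| (1 <<< u), u) := by
          intro he
          rw [Prod.mk.injEq] at he
          have h5 := testBit_or_one_shl_self m u
          rw [← he.1, tb] at h5; cases h5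
        rw [PySem.Dict.getD_insert_of_ne _ _ _ hne]
        by_cases he : ((mask' : Nat), u') = (m ||| (1 <<< u), u)
        · rw [Prod.mk.injEq] at he
          obtain ⟨he1, he2⟩ := he
          subst he2
          subst he1
          rw [PySem.Dict.getD_insert_self,
            if_neg (fun hc : u' ∈ tl ∧ _ => hu hc.1),
            if_pos ⟨List.mem_cons_self, tb, hadj, rfl⟩]
          omega
        · rw [PySem.Dict.getD_insert_of_ne _ _ _ he]
          congr 1
          apply if_congr _ rfl rfl
          constructor
          · rintro ⟨h1, h2, h3, h4⟩; exact ⟨List.mem_cons_of_mem _ h1, h2, h3, h4⟩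
          · rintro ⟨h1, h2, h3, h4⟩
            rcases List.mem_cons.mp h1 with hh | hh
            · exact absurd (by rw [h4, hh]) he
            · exact ⟨hh, h2, h3, h4⟩
      · rw [if_neg hadj, ih htl d mask' u']
        congr 1
        apply if_congr _ rfl rfl
        constructor
        · rintro ⟨h1, h2, h3, h4⟩; exact ⟨List.mem_cons_of_mem _ h1, h2, h3, h4⟩
        · rintro ⟨h1, h2, h3, h4⟩
          rcases List.mem_cons.mp h1 with hh | hh
          · exact absurd (hh ▸ h3) hadj
          · exact ⟨hh, h2, h3, h4⟩

-- ---- the middle v-loop of A's DP ----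
theorem innerV (adj : List (List Bool)) (N m : Nat) (vs : List Nat) :
    ∀ (d : PySem.Dict (Nat × Nat) Int) (G : Nat → Int),
    (∀ w, d.getD (m, w) 0 = G w) → ∀ (mask' u' : Nat),
    ((vs.foldl (fun d v =>
        if m &&& (1 <<< v) = 0 then d
        else if d.contains (m, v) = false ∨ d.getD (m, v) 0 = 0 then d
        else (List.range N).foldl (fun d u =>
          if m &&& (1 <<< u) ≠ 0 then d
          else if adjAt adj v u then
            d.insert (m ||| (1 <<< u), u)
              (d.getD (m ||| (1 <<< u), u) 0 + d.getD (m, v) 0)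
          else d) d) d)).getD (mask', u') 0 =
      d.getD (mask', u') 0 +
        (if u' < N ∧ m.testBit u' = false ∧ mask' = m ||| (1 <<< u')
         then ((vs.map (fun v =>
             if m.testBit v = true ∧ adjAt adj v u' = true then G v else 0)).sum)
         else 0) := by
  induction vs with
  | nil => intro d G hG mask' u'; simp
  | cons v tl ih =>
    intro d G hG mask' u'
    simp only [List.foldl_cons, List.map_cons, List.sum_cons]
    by_cases hbit : m &&& (1 <<< v) = 0
    · have tb : m.testBit v = false := (band_one_shl_eq_zero_iff m v).mp hbit
      rw [if_pos hbit, ih d G hG mask' u']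
      have hz : (if m.testBit v = true ∧ adjAt adj v u' = true then G v else 0) = 0 :=
        if_neg (fun hc => by rw [tb] at hc; cases hc.1)
      rw [hz, zero_add]
    · rw [if_neg hbit]
      have tb : m.testBit v = true := by
        rcases Bool.eq_false_or_eq_true (m.testBit v) with h | h
        · exact h
        · exact absurd ((band_one_shl_eq_zero_iff m v).mpr h) hbit
      by_cases hskip : d.contains (m, v) = false ∨ d.getD (m, v) 0 = 0
      · rw [if_pos hskip, ih d G hG mask' u']
        have hz : G v = 0 := by
          rcases hskip with h | h
          · rw [← hG v]; exact PySem.Dict.getD_of_not_contains d 0 h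
          · rw [← hG v]; exact h
        have hz2 : (if m.testBit v = true ∧ adjAt adj v u' = true then G v else 0) = 0 := by
          split_ifs <;> simp [hz]
        rw [hz2, zero_add]
      · rw [if_neg hskip]
        have hU := innerU adj m v (List.range N) (List.nodup_range) d
        have hGd1 : ∀ w, ((List.range N).foldl (fun d u =>
            if m &&& (1 <<< u) ≠ 0 then d
            else if adjAt adj v u then
              d.insert (m ||| (1 <<< u), u)
                (d.getD (m ||| (1 <<< u), u) 0 + d.getD (m, v) 0)
            else d) d).getD (m, w) 0 = G w := by
          intro w
          rw [hU m w, if_neg (fun hc : _ ∧ _ ∧ _ ∧ (m : Nat) = m ||| (1 <<< w) => by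
            have h5 := testBit_or_one_shl_self m w
            rw [← hc.2.2.2, hc.2.1] at h5; cases h5), add_zero, hG]
        rw [ih _ G hGd1 mask' u', hU mask' u']
        by_cases hc : u' < N ∧ m.testBit u' = false ∧ mask' = m ||| (1 <<< u')
        · rw [if_pos hc, if_pos hc]
          by_cases ha : adjAt adj v u' = true
          · rw [if_pos ⟨List.mem_range.mpr hc.1, hc.2.1, ha, hc.2.2⟩, if_pos ⟨tb, ha⟩, hG v]
            omega
          · rw [if_neg (fun hx => ha hx.2.2.1), if_neg (fun hx => ha hx.2)]
            omega
        · rw [if_neg hc, if_neg hc,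
            if_neg (fun hx : _ ∈ List.range N ∧ _ => hc ⟨List.mem_range.mp hx.1, hx.2.1, hx.2.2.2⟩)]
          omega

theorem altF_base (adj : List (List Bool)) (N v : Nat) : altF adj N (1 <<< v) v = 1 := by
  rw [altF]
  simp [Nat.one_shiftLeft]

-- value of A's dp table after the masks 1..K have been processed
def Pfun (adj : List (List Bool)) (N K mask v : Nat) : Int :=
  if v < N ∧ mask.testBit v = true ∧ (mask ^^^ (1 <<< v) = 0 ∨ mask ^^^ (1 <<< v) ≤ K)
  then altF adj N mask v else 0

theorem dpInv (adj : List (List Bool)) (N : Nat) : ∀ (K mask v : Nat),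
    (((List.range' 1 K).foldl (fun d mask =>
      (List.range N).foldl (fun d v =>
        if mask &&& (1 <<< v) = 0 then d
        else if d.contains (mask, v) = false ∨ d.getD (mask, v) 0 = 0 then d
        else (List.range N).foldl (fun d u =>
          if mask &&& (1 <<< u) ≠ 0 then d
          else if adjAt adj v u then
            d.insert (mask ||| (1 <<< u), u)
              (d.getD (mask ||| (1 <<< u), u) 0 + d.getD (mask, v) 0)
          else d) d) d)
      ((List.range N).foldl (fun d v => d.insert (1 <<< v, v) 1)
        (PySem.Dict.empty : PySem.Dict (Nat × Nat) Int)))).getD (mask, v) 0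
    = Pfun adj N K mask v := by
  intro K
  induction K with
  | zero =>
    intro mask v
    simp only [List.range', List.foldl_nil]
    rw [dp0_getD]
    unfold Pfun
    by_cases h : mask = 1 <<< v
    · subst h
      by_cases hv : v < N
      · rw [if_pos ⟨rfl, hv⟩,
          if_pos ⟨hv, by simp [Nat.one_shiftLeft], Or.inl (by simp)⟩, altF_base]
      · rw [if_neg (fun hc => hv hc.2), if_neg (fun hc => hv hc.1)]
    · rw [if_neg (fun hc => h hc.1), if_neg (fun hc => ?_)]
      rcases hc.2.2 with hx | hx
      · exact h (Nat.xor_eq_zero_iff.mp hx)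
      · exact h (Nat.xor_eq_zero_iff.mp (Nat.le_zero.mp hx))
  | succ K ih =>
    intro mask v
    simp only [List.range'_1_concat, List.foldl_append, List.foldl_cons, List.foldl_nil]
    rw [show 1 + K = K + 1 from Nat.add_comm 1 K]
    rw [innerV adj N (K + 1) (List.range N) _ (fun w => Pfun adj N K (K + 1) w)
      (fun w => ih (K + 1) w) mask v, ih mask v]
    by_cases hc : v < N ∧ (K + 1).testBit v = false ∧ mask = (K + 1) ||| (1 <<< v)
    · obtain ⟨hvN, htb, hmask⟩ := hc
      have hxor : mask ^^^ (1 <<< v) = K + 1 := by rw [hmask]; exact or_one_shl_xor htb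
      have htbm : mask.testBit v = true := by rw [hmask]; exact testBit_or_one_shl_self _ _
      rw [if_pos ⟨hvN, htb, hmask⟩]
      have h0 : Pfun adj N K mask v = 0 := by
        unfold Pfun
        rw [if_neg]
        rintro ⟨_, _, h | h⟩ <;> omega
      rw [h0, zero_add]
      unfold Pfun
      have hg1 : ¬(mask &&& 1 <<< v = 0) := fun hx => by
        rw [(band_one_shl_eq_zero_iff mask v).mp hx] at htbm; cases htbm
      have hg2 : ¬(mask = 1 <<< v) := fun hx => by rw [hx] at hxor; simp at hxor
      rw [if_pos ⟨hvN, htbm, Or.inr (by omega)⟩, altF, dif_neg hg1, if_neg hg2, hxor]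
      refine congrArg List.sum (List.map_congr_left ?_)
      intro w hw
      by_cases hb : (K + 1).testBit w = true
      · have hcond : (K + 1) &&& (1 <<< w) ≠ 0 := fun hx =>
          by rw [(band_one_shl_eq_zero_iff _ w).mp hx] at hb; cases hb
        by_cases ha : adjAt adj w v = true
        · rw [if_pos ⟨hb, ha⟩,
            if_pos ⟨List.mem_range.mp hw, hb, Or.inr (by
              have := xor_one_shl_lt hb; omega)⟩,
            if_pos ⟨hcond, ha⟩]
        · rw [if_neg (fun hx => ha hx.2), if_neg (fun hx => ha hx.2)]
      · have hb' : (K + 1).testBit w = false := by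
          rcases Bool.eq_false_or_eq_true ((K + 1).testBit w) with h | h
          · exact absurd h hb
          · exact h
        rw [if_neg (fun hx => hb hx.1),
          if_neg (fun hx => hx.1 ((band_one_shl_eq_zero_iff _ w).mpr hb'))]
    · rw [if_neg hc, add_zero]
      unfold Pfun
      by_cases h2 : v < N ∧ mask.testBit v = true
      · by_cases hx : mask ^^^ (1 <<< v) = K + 1
        · obtain ⟨hor, hbit⟩ := eq_or_of_xor_one_shl h2.2 hx
          exact absurd ⟨h2.1, hbit, hor⟩ hc
        · apply if_congr _ rfl rfl
          constructor
          · rintro ⟨a, b, c⟩; exact ⟨a, b, by omega⟩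
          · rintro ⟨a, b, c⟩; exact ⟨a, b, by omega⟩
      · rw [if_neg (fun hcc => h2 ⟨hcc.1, hcc.2.1⟩), if_neg (fun hcc => h2 ⟨hcc.1, hcc.2.1⟩)]

theorem count_eq (adj : List (List Bool)) (N : Nat) :
    count_ham_dp adj N = count_ham_rec adj N := by
  simp only [count_ham_dp, count_ham_rec]
  refine congrArg List.sum (List.map_congr_left ?_)
  intro v hv
  rw [dpInv adj N (1 <<< N - 1) (1 <<< N - 1) v]
  unfold Pfun
  have hvN := List.mem_range.mp hv
  have htb : (1 <<< N - 1).testBit v = true := by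
    rw [Nat.one_shiftLeft, Nat.testBit_two_pow_sub_one]
    simp [hvN]
  rw [if_pos ⟨hvN, htb, Or.inr (Nat.le_of_lt (xor_one_shl_lt htb))⟩]

-- ---- the arc list ----
def arcsList (N : Nat) : List (Nat × Nat) :=
  (List.range N).flatMap (fun i => (List.range' (i + 2) (N - (i + 2))).map (fun j => (i, j)))

theorem sum_sub_two (N : Nat) :
    2 * (((List.range N).map (fun i => N - (i + 2))).sum) = (N - 1) * (N - 2) := by
  induction N with
  | zero => rfl
  | succ N ih =>
    rw [List.range_succ_eq_map, List.map_cons, List.map_map, List.sum_cons]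
    have he : ((List.range N).map ((fun i => N + 1 - (i + 2)) ∘ Nat.succ))
        = (List.range N).map (fun i => N - (i + 2)) :=
      List.map_congr_left (fun i _ => by simp only [Function.comp]; omega)
    rw [he]
    rcases N with _ | M
    · rfl
    · rcases M with _ | J
      · simp
      · have h1 : J + 2 + 1 - 2 = J + 1 := by omega
        have h2 : J + 2 + 1 - 1 = J + 2 := by omega
        have h3 : J + 2 - 1 = J + 1 := by omega
        have h4 : J + 2 - 2 = J := by omega
        rw [h1, h2] at *
        rw [h3, h4] at ih
        rw [Nat.mul_add, ih]
        ring

theorem arcsList_length (N : Nat) : 2 * (arcsList N).length = (N - 1) * (N - 2) := by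
  rw [arcsList, List.length_flatMap]
  have he : ((List.range N).map (fun i =>
      ((List.range' (i + 2) (N - (i + 2))).map (fun j => ((i : Nat), j))).length))
      = (List.range N).map (fun i => N - (i + 2)) :=
    List.map_congr_left (fun i _ => by simp)
  rw [he, sum_sub_two]

theorem arcsList_nodup (N : Nat) : (arcsList N).Nodup := by
  rw [arcsList, List.nodup_flatMap]
  constructor
  · intro i _
    exact (List.nodup_range' ).map (fun a b hab => by simpa using hab)
  · refine List.Pairwise.imp ?_ (List.pairwise_lt_range)
    intro a b hab x hxa hxb
    obtain ⟨ja, _, hja⟩ := List.mem_map.mp hxa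
    obtain ⟨jb, _, hjb⟩ := List.mem_map.mp hxb
    rw [← hja] at hjb
    have : b = a := congrArg Prod.fst hjb
    omega

-- B's m (closed form, over Int) equals A's m (the length of the arc list)
theorem mB_eq (N : Nat) :
    (if (N : Int) ≥ 2 then PySem.Int.floordiv (((N : Int) - 1) * ((N : Int) - 2)) 2 else 0)
      = ((arcsList N).length : Int) := by
  have hlen := arcsList_length N
  by_cases h2 : (N : Int) ≥ 2
  · rw [if_pos h2]
    have hN : 2 ≤ N := by exact_mod_cast h2
    have hcast : ((N : Int) - 1) * ((N : Int) - 2) = (((N - 1) * (N - 2) : Nat) : Int) := by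
      push_cast [Nat.cast_sub (by omega : 1 ≤ N), Nat.cast_sub hN]
      ring
    rw [hcast, show (2 : Int) = ((2 : Nat) : Int) from rfl, PySem.Int.floordiv_natCast]
    congr 1
    omega
  · rw [if_neg h2]
    have hN : N ≤ 1 := by omega
    have : (N - 1) * (N - 2) = 0 := by
      rcases N with _ | M
      · rfl
      · rcases M with _ | J
        · rfl
        · omega
    omega

-- A's tourn_perm dict and B's perm list agree on every k < m
theorem perm_eq (N : Nat) (k : Nat) (hk : k < (arcsList N).length) :
    ((arcsList N).zipIdx.foldl (fun d p =>
        if (arcsList N).contains (tourn_sigma_arc p.1.1 p.1.2 N) then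
          d.insert p.2 ((PySem.List.index? (arcsList N) (tourn_sigma_arc p.1.1 p.1.2 N)).getD 0)
        else d.insert p.2 p.2) (PySem.Dict.empty : PySem.Dict Nat Nat)).getD k 0
    = (((arcsList N).zipIdx.map (fun p =>
        ((arcsList N).zipIdx.foldl (fun d p => d.insert p.1 p.2)
          (PySem.Dict.empty : PySem.Dict (Nat × Nat) Nat)).getD
            (tourn_sigma_arc p.1.1 p.1.2 N) p.2))).getD k 0 := by
  have hnd := arcsList_nodup N
  have hfe : (fun (d : PySem.Dict Nat Nat) (p : (Nat × Nat) × Nat) =>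
      if (arcsList N).contains (tourn_sigma_arc p.1.1 p.1.2 N) then
        d.insert p.2 ((PySem.List.index? (arcsList N) (tourn_sigma_arc p.1.1 p.1.2 N)).getD 0)
      else d.insert p.2 p.2)
    = (fun d p => d.insert p.2
        (if (arcsList N).contains (tourn_sigma_arc p.1.1 p.1.2 N)
         then ((PySem.List.index? (arcsList N) (tourn_sigma_arc p.1.1 p.1.2 N)).getD 0)
         else p.2)) := by
    funext d p
    by_cases hc : (arcsList N).contains (tourn_sigma_arc p.1.1 p.1.2 N) = true
    · rw [if_pos hc, if_pos hc]
    · rw [if_neg hc, if_neg hc]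
  rw [hfe]
  -- left side: read the (k ↦ value) dict entry back
  have hxmem : (((arcsList N)[k]'hk, k) : (Nat × Nat) × Nat) ∈ (arcsList N).zipIdx := by
    rw [List.mem_zipIdx_iff_getElem?]
    exact List.getElem?_eq_getElem hk
  have hL := getD_foldl_insert_hit ((arcsList N).zipIdx) (fun p => p.2)
    (fun p => if (arcsList N).contains (tourn_sigma_arc p.1.1 p.1.2 N)
      then ((PySem.List.index? (arcsList N) (tourn_sigma_arc p.1.1 p.1.2 N)).getD 0)
      else p.2) 0 PySem.Dict.empty (((arcsList N)[k]'hk, k)) hxmem (fun y hy hky => by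
        rw [List.mem_zipIdx_iff_getElem?] at hy
        simp only at hky
        rw [hky] at hy
        rw [List.getElem?_eq_getElem hk] at hy
        have hy1 : y.1 = (arcsList N)[k]'hk := by
          have := hy.symm
          injection this
        have : y = (((arcsList N)[k]'hk, k) : (Nat × Nat) × Nat) := Prod.ext hy1 hky
        rw [this])
  rw [hL]
  -- right side: index the mapped list
  have hklen : k < (((arcsList N).zipIdx.map (fun p =>
      ((arcsList N).zipIdx.foldl (fun d p => d.insert p.1 p.2)
        (PySem.Dict.empty : PySem.Dict (Nat × Nat) Nat)).getD
          (tourn_sigma_arc p.1.1 p.1.2 N) p.2))).length := by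
    simpa using hk
  rw [List.getD_eq_getElem _ 0 hklen, List.getElem_map]
  have hzk : ((arcsList N).zipIdx)[k]'(by simpa using hk) = (((arcsList N)[k]'hk, k)) := by
    simp [List.getElem_zipIdx]
  rw [hzk]
  beta_reduce
  simp only
  -- both reduce to the same value
  by_cases hmem : tourn_sigma_arc ((arcsList N)[k]'hk).1 ((arcsList N)[k]'hk).2 N ∈ arcsList N
  · have hcont : (arcsList N).contains
        (tourn_sigma_arc ((arcsList N)[k]'hk).1 ((arcsList N)[k]'hk).2 N) = true := by
      simpa using hmem
    obtain ⟨i, hidx⟩ := Option.isSome_iff_exists.mp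
      ((PySem.List.index?_isSome_iff (arcsList N) _).mpr hmem)
    obtain ⟨hilt, hieq, _⟩ := PySem.List.getElem_of_index?_eq_some hidx
    rw [if_pos hcont, hidx]
    have hR := getD_foldl_insert_hit ((arcsList N).zipIdx) (fun p => p.1) (fun p => p.2) k
      PySem.Dict.empty ((tourn_sigma_arc ((arcsList N)[k]'hk).1 ((arcsList N)[k]'hk).2 N, i))
      (by rw [List.mem_zipIdx_iff_getElem?]
          simp only
          rw [List.getElem?_eq_getElem hilt, hieq])
      (fun y hy hky => by
        rw [List.mem_zipIdx_iff_getElem?] at hy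
        simp only at hky ⊢
        have hylt : y.2 < (arcsList N).length := by
          rcases List.getElem?_eq_some_iff.mp hy with ⟨hl, _⟩
          exact hl
        have hyeq : (arcsList N)[y.2]'hylt = y.1 := by
          rw [List.getElem?_eq_getElem hylt] at hy
          injection hy
        rw [hky, ← hieq] at hyeq
        exact (List.Nodup.getElem_inj_iff hnd).mp hyeq)
    simp only at hR
    rw [hR]
    rfl
  · have hcont : (arcsList N).contains
        (tourn_sigma_arc ((arcsList N)[k]'hk).1 ((arcsList N)[k]'hk).2 N) = false := by
      simpa using hmem
    have hnc : ¬ ((arcsList N).contains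
        (tourn_sigma_arc ((arcsList N)[k]'hk).1 ((arcsList N)[k]'hk).2 N) = true) := by
      simpa using hmem
    rw [if_neg hnc]
    have hM := getD_foldl_insert_miss ((arcsList N).zipIdx) (fun p => p.1) (fun p => p.2)
      (PySem.Dict.empty : PySem.Dict (Nat × Nat) Nat)
      (tourn_sigma_arc ((arcsList N)[k]'hk).1 ((arcsList N)[k]'hk).2 N) k
      (fun p hp hpe => by
        rw [List.mem_zipIdx_iff_getElem?] at hp
        have : p.1 ∈ arcsList N := List.mem_of_getElem? hp
        exact hmem (hpe ▸ this))
    exact (hM.trans (PySem.Dict.getD_empty _ _)).symm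

-- the h-value dict of A reads back the count of its key
theorem hvals_getD (N K : Nat) (arcs : List (Nat × Nat)) (t : Nat) :
    (((List.range K).foldl (fun d bits =>
        d.insert bits (count_ham_dp (build_adj N bits arcs) N))
        (PySem.Dict.empty : PySem.Dict Nat Int))).getD t 0
      = if t < K then count_ham_dp (build_adj N t arcs) N else 0 := by
  by_cases h : t < K
  · rw [if_pos h]
    exact getD_foldl_insert_hit (List.range K) (fun b => b)
      (fun b => count_ham_dp (build_adj N b arcs) N) 0 _ t (List.mem_range.mpr h)
      (fun y _ hy => by simp_all)
  · rw [if_neg h, getD_foldl_insert_miss _ (fun b => b) _ _ _ _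
      (fun b hb => by simp only [List.mem_range] at hb; intro he; exact h (he ▸ hb))]
    rfl

theorem list_getD_map_range {β : Type} [Inhabited β] (K : Nat) (g : Nat → β) (t : Nat) :
    ((List.range K).map g).getD t default = if t < K then g t else default := by
  by_cases ht : t < K
  · rw [if_pos ht, List.getD_eq_getElem _ _ (by simpa using ht), List.getElem_map,
      List.getElem_range]
  · rw [if_neg ht, List.getD_eq_default]
    simpa using Nat.le_of_not_lt ht

theorem cond_bits_iff (bits k : Nat) : (bits &&& (1 <<< k) ≠ 0) ↔ ((bits >>> k) &&& 1 ≠ 0) := by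
  constructor
  · intro h h2
    exact h ((band_one_shl_eq_zero_iff bits k).mpr ((shr_band_one_eq_zero_iff bits k).mp h2))
  · intro h h2
    exact h ((shr_band_one_eq_zero_iff bits k).mpr ((band_one_shl_eq_zero_iff bits k).mp h2))

theorem verify_eq_on_nat (N : Nat) :
    verify_tournament_sigma_preserves_H (N : Int)
      = verify_tournament_sigma_preserves_H_alt (N : Int) := by
  simp only [verify_tournament_sigma_preserves_H, verify_tournament_sigma_preserves_H_alt,
    Int.toNat_natCast]
  rw [mB_eq N]
  have ha : (List.range N).flatMap (fun i =>
      (List.range' (i + 2) (N - (i + 2))).map (fun j => (i, j))) = arcsList N := rfl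
  rw [ha]
  simp only [Int.toNat_natCast]
  by_cases h18 : (arcsList N).length > 18
  · rw [if_pos h18, if_pos (show (((arcsList N).length : Int)) > 18 by exact_mod_cast h18)]
  · rw [if_neg h18, if_neg (show ¬ ((((arcsList N).length : Int)) > 18) by exact_mod_cast h18)]
    congr 1
    apply congrArg (fun (x : Bool) => x = true)
    apply congrArg
    funext bits
    have hnb : (List.range (arcsList N).length).foldl (fun nb k =>
        if bits &&& (1 <<< k) ≠ 0 then
          nb ||| (1 <<< (((arcsList N).zipIdx.foldl (fun d p =>
            if (arcsList N).contains (tourn_sigma_arc p.1.1 p.1.2 N) then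
              d.insert p.2 ((PySem.List.index? (arcsList N) (tourn_sigma_arc p.1.1 p.1.2 N)).getD 0)
            else d.insert p.2 p.2) (PySem.Dict.empty : PySem.Dict Nat Nat)).getD k 0))
        else nb) 0
      = (List.range (arcsList N).length).foldl (fun img k =>
          if (bits >>> k) &&& 1 ≠ 0 then
            img ||| (1 <<< ((((arcsList N).zipIdx.map (fun p =>
              ((arcsList N).zipIdx.foldl (fun d p => d.insert p.1 p.2)
                (PySem.Dict.empty : PySem.Dict (Nat × Nat) Nat)).getD
                  (tourn_sigma_arc p.1.1 p.1.2 N) p.2))).getD k 0))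
          else img) 0 := by
      apply PySem.List.foldl_congr_mem
      intro acc k hkmem
      rw [perm_eq N k (List.mem_range.mp hkmem)]
      exact if_congr (cond_bits_iff bits k) rfl rfl
    rw [hnb]
    rw [hvals_getD N (1 <<< (arcsList N).length) (arcsList N) bits,
      hvals_getD N (1 <<< (arcsList N).length) (arcsList N)]
    rw [show ((List.range (1 <<< (arcsList N).length)).map (fun bits =>
        count_ham_rec (build_adj N bits (arcsList N)) N)).getD bits 0
      = if bits < 1 <<< (arcsList N).length
        then count_ham_rec (build_adj N bits (arcsList N)) N else 0 from
      list_getD_map_range _ _ bits]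
    rw [show ∀ t, ((List.range (1 <<< (arcsList N).length)).map (fun bits =>
        count_ham_rec (build_adj N bits (arcsList N)) N)).getD t 0
      = if t < 1 <<< (arcsList N).length
        then count_ham_rec (build_adj N t (arcsList N)) N else 0 from
      fun t => list_getD_map_range _ _ t]
    simp only [count_eq]

-- ===== VERDICT (by name: the statement is the Claim_ definition above) =====
theorem verify_tournament_sigma_preserves_H_spec : Claim_equal_verify_tournament_sigma_preserves_H := by
  intro n _ hpre
  unfold Spec_verify_tournament_sigma_preserves_H
  have h : n = ((n.toNat : Nat) : Int) := (Int.toNat_of_nonneg hpre).symm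
  rw [h]
  exact verify_eq_on_nat n.toNat
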